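-- pv_equiv track=rewrite | github.com/sioufia/formal_check_project | old/language_while.py | block_split
-- ===== SOURCE A (Python) =====
-- A_OPS=["+","*","-"]
--
-- def parenthesis_block_len(input:str):
--     i=1
--     n=len(input)
--     nb_open_parenthesis = 0
--     while i < n:
--         if input[i] == "(":
--             nb_open_parenthesis += 1
--         elif input[i] == ")":
--             if nb_open_parenthesis == 0:
--                 break
--             else:
--                 nb_open_parenthesis -= 1
--         i += 1
--     return i
--
-- def block_split(input:str):
--     i=0
--     n=len(input)
--     res=[]
--     buffer=""
--     while i<n:
--         if input[i] in A_OPS: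
--             res+=[buffer,input[i]]
--             buffer=""
--             i += 1
--         elif input[i]=="(":
--             b_len=parenthesis_block_len(input[i:])
--             res+=[input[i+1:i+b_len]]
--             i+=b_len+1
--         else:
--             buffer+=input[i]
--             i+=1
--     return res
-- ===== SOURCE B (Python) =====
-- def block_split(input: str):
--     res = []
--     buffer = ""
--     block = ""
--     depth = 0
--     for c in input:
--         if depth == 0:
--             if c in "+*-":
--                 res += [buffer, c]
--                 buffer = ""
--             elif c == "(":
--                 depth = 1
--                 block = ""
--             else:
--                 buffer += c
--         else:
--             if c == "(":
--                 depth += 1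
--                 block += c
--             elif c == ")":
--                 depth -= 1
--                 if depth == 0:
--                     res.append(block)
--                     block = ""
--                 else:
--                     block += c
--             else:
--                 block += c
--     if depth > 0:
--         res.append(block)
--     return res
-- ===== Notes on version B (the rewrite author's own statement) =====
-- stated objective: faster
-- what changed: Replaced A's helper that re-scans a sliced suffix to find each parenthesis block's length (plus index-jump slicing) with a single left-to-right state machine over the characters keeping a paren-depth counter and a block accumulator.
import Mathlib
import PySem

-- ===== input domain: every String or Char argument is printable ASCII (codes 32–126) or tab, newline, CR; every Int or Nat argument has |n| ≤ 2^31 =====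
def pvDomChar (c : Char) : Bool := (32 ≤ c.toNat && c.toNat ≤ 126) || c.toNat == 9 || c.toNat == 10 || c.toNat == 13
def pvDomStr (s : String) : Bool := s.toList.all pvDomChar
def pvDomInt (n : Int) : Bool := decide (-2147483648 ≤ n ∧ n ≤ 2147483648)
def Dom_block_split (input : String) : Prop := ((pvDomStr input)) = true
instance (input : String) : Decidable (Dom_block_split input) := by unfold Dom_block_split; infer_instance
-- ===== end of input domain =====

-- B replaces A's helper-rescan-and-slice structure with a single pass keeping a paren-depth
-- counter and a block accumulator (objective: faster — one pass, no suffix slicing/rescans).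

-- ===== PORT A =====
-- The index loop of parenthesis_block_len is ported as structural recursion over the
-- characters from index i (first argument), carrying nb_open_parenthesis and i.
def pblLoop : List Char → Nat → Nat → Nat
  | [], _, i => i
  | c :: rest, nb, i =>
    if c = '(' then pblLoop rest (nb + 1) (i + 1)
    else if c = ')' then
      if nb = 0 then i else pblLoop rest (nb - 1) (i + 1)
    else pblLoop rest nb (i + 1)

-- parenthesis_block_len(input): starts at i = 1, i.e. scans input[1:].
def parenthesis_block_len (s : List Char) : Nat := pblLoop (s.drop 1) 0 1

-- A's while-loop over index i, ported as recursion over the remaining characters;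
-- the string buffer is carried as its character list.
def blockLoopA : List Char → List Char → List String
  | [], _buf => []                                            -- leftover buffer is dropped
  | c :: rest, buf =>
    if c = '+' ∨ c = '*' ∨ c = '-' then                       -- input[i] in A_OPS
      String.mk buf :: String.mk [c] :: blockLoopA rest []
    else if c = '(' then
      let b_len := parenthesis_block_len (c :: rest)          -- on input[i:]
      -- input[i+1:i+b_len] is, on the remaining characters, take b_len then drop 1
      String.mk (((c :: rest).take b_len).drop 1) ::
        blockLoopA ((c :: rest).drop (b_len + 1)) buf         -- i += b_len + 1
    else blockLoopA rest (buf ++ [c])                         -- buffer += input[i]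
termination_by l _ => l.length
decreasing_by
  all_goals simp [List.length_drop]

def block_split (input : String) : List String := blockLoopA input.toList []

-- ===== PORT B =====
-- Single pass: (remaining chars, depth, buffer, block); buffers carried as character lists.
def blockLoopB : List Char → Nat → List Char → List Char → List String
  | [], depth, _buf, block => if 0 < depth then [String.mk block] else []
  | c :: rest, depth, buf, block =>
    if depth = 0 then
      if c = '+' ∨ c = '*' ∨ c = '-' then
        String.mk buf :: String.mk [c] :: blockLoopB rest 0 [] block
      else if c = '(' then blockLoopB rest 1 buf []
      else blockLoopB rest 0 (buf ++ [c]) block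
    else
      if c = '(' then blockLoopB rest (depth + 1) buf (block ++ [c])
      else if c = ')' then
        if depth = 1 then String.mk block :: blockLoopB rest 0 buf []
        else blockLoopB rest (depth - 1) buf (block ++ [c])
      else blockLoopB rest depth buf (block ++ [c])

def block_split_alt (input : String) : List String := blockLoopB input.toList 0 [] []

-- ===== PRECONDITION & SPEC =====
def Spec_block_split (input : String) (out : List String) : Prop := out = block_split_alt input
instance (input : String) (out : List String) : Decidable (Spec_block_split input out) := by unfold Spec_block_split; infer_instance

-- ===== CLAIM (what is proved, stated in full; the proofs are below) =====
def Claim_equal_block_split : Prop := ∀ (input : String), Dom_block_split input → Spec_block_split input (block_split input)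

-- ===== LEMMAS AND PROOFS =====

-- pblLoop only adds to i: its result is i plus the relative stop position.
theorem pblLoop_shift (l : List Char) : ∀ nb i, pblLoop l nb i = i + pblLoop l nb 0 := by
  induction l with
  | nil => intro nb i; simp [pblLoop]
  | cons c rest ih =>
    intro nb i
    simp only [pblLoop]
    split_ifs with h1 h2 h3
    · rw [ih (nb + 1) (i + 1), ih (nb + 1) 1]; omega
    · omega
    · rw [ih (nb - 1) (i + 1), ih (nb - 1) 1]; omega
    · rw [ih nb (i + 1), ih nb 1]; omega

-- Inside a parenthesis block, B's state machine at depth nb+1 emits exactly the characters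
-- up to the stop position computed by A's pblLoop, then resumes at depth 0 past it.
theorem loopB_depth (l : List Char) : ∀ nb (buf bacc : List Char),
    blockLoopB l (nb + 1) buf bacc =
      String.mk (bacc ++ l.take (pblLoop l nb 0)) ::
        blockLoopB (l.drop (pblLoop l nb 0 + 1)) 0 buf [] := by
  induction l with
  | nil => intro nb buf bacc; simp [blockLoopB, pblLoop]
  | cons c rest ih =>
    intro nb buf bacc
    by_cases h1 : c = '('
    · subst h1
      simp only [blockLoopB, pblLoop, reduceIte, Nat.add_one_ne_zero, if_false]
      rw [ih (nb + 1) buf (bacc ++ ['('])]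
      rw [pblLoop_shift rest (nb + 1) 1, Nat.add_comm 1 (pblLoop rest (nb + 1) 0)]
      simp [List.append_assoc]
    · by_cases h2 : c = ')'
      · subst h2
        by_cases h3 : nb = 0
        · subst h3
          simp [blockLoopB, pblLoop]
        · have hnb : nb - 1 + 1 = nb := Nat.succ_pred_eq_of_pos (Nat.pos_of_ne_zero h3)
          simp only [blockLoopB, pblLoop, reduceIte, Nat.add_one_ne_zero, if_false,
            if_neg h3]
          have hd1 : ¬ (nb + 1 = 1) := by omega
          rw [if_neg hd1]
          have : nb + 1 - 1 = (nb - 1) + 1 := by omega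
          rw [this, ih (nb - 1) buf (bacc ++ [')'])]
          rw [pblLoop_shift rest (nb - 1) 1, Nat.add_comm 1 (pblLoop rest (nb - 1) 0)]
          simp [List.append_assoc]
      · have hops : blockLoopB (c :: rest) (nb + 1) buf bacc
            = blockLoopB rest (nb + 1) buf (bacc ++ [c]) := by
          simp [blockLoopB, h1, h2]
        have hp : pblLoop (c :: rest) nb 0 = 1 + pblLoop rest nb 0 := by
          simp only [pblLoop, if_neg h1, if_neg h2]
          rw [pblLoop_shift rest nb 1]
        rw [hops, ih nb buf (bacc ++ [c]), hp, Nat.add_comm 1 (pblLoop rest nb 0)]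
        simp [List.append_assoc]

-- A's loop equals B's state machine at depth 0 (strong induction on the length, since A
-- skips past whole parenthesis blocks).
theorem loopA_eq_loopB : ∀ n (l : List Char) (buf : List Char), l.length ≤ n →
    blockLoopA l buf = blockLoopB l 0 buf [] := by
  intro n
  induction n with
  | zero =>
    intro l buf h
    cases l with
    | nil => simp [blockLoopA, blockLoopB]
    | cons c rest => simp at h
  | succ n ih =>
    intro l buf h
    cases l with
    | nil => simp [blockLoopA, blockLoopB]
    | cons c rest =>
      have hlen : rest.length ≤ n := by simp at h; omega
      by_cases hop : c = '+' ∨ c = '*' ∨ c = '-'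
      · simp only [blockLoopA, blockLoopB, if_pos hop, reduceIte]
        rw [ih rest [] hlen]
      · by_cases hpar : c = '('
        · subst hpar
          have hb : parenthesis_block_len ('(' :: rest) = pblLoop rest 0 0 + 1 := by
            simp only [parenthesis_block_len, List.drop_succ_cons, List.drop_zero]
            rw [pblLoop_shift rest 0 1]; omega
          simp only [blockLoopA, if_neg hop, reduceIte, hb]
          rw [List.take_succ_cons, List.drop_succ_cons, List.drop_succ_cons]
          simp only [blockLoopB, if_neg hop, reduceIte]
          rw [loopB_depth rest 0 buf []]
          simp only [List.nil_append]
          have hlen2 : (rest.drop (pblLoop rest 0 0 + 1)).length ≤ n := by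
            simp [List.length_drop]; omega
          rw [ih _ buf hlen2]
          simp
        · simp only [blockLoopA, blockLoopB, if_neg hop, if_neg hpar, reduceIte]
          exact ih rest (buf ++ [c]) hlen

-- ===== VERDICT (by name: the statement is the Claim_ definition above) =====
theorem block_split_spec : Claim_equal_block_split := by
  intro input _
  unfold Spec_block_split block_split block_split_alt
  exact loopA_eq_loopB input.toList.length input.toList [] le_rfl
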